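-- pv_equiv track=rewrite | github.com/cdmichaelb/Class_Raven | Code/ChristerpherHunter/Python/peaks_and_valleys.py | valleys
-- ===== SOURCE A (Python) =====
-- def valleys(data: list) -> list:
--
--     lst = list()
--     for i, val in enumerate(data):
--         if i == 9:
--             lst.append(val)
--         elif i == 17:
--             lst.append(val)
--     return lst
-- ===== SOURCE B (Python) =====
-- def valleys(data: list) -> list:
--     lst = []
--     if len(data) > 9:
--         lst.append(data[9])
--     if len(data) > 17:
--         lst.append(data[17])
--     return lst
-- ===== Notes on version B (the rewrite author's own statement) =====
-- stated objective: simpler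
-- what changed: Replaces the full enumerate scan with two length-guarded direct accesses at index 9 and index 17.
import Mathlib
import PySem

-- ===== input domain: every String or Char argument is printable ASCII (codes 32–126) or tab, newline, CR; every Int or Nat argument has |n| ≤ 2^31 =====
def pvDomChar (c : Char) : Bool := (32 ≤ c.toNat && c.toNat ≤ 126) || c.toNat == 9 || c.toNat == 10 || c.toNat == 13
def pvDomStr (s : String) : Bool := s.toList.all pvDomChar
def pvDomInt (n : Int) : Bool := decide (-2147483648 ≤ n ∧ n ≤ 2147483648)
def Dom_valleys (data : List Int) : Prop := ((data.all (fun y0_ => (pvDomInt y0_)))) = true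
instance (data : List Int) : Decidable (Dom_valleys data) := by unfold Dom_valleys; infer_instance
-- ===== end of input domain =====

-- B replaces A's full enumerate scan with two length-guarded direct accesses at index 9 and index 17 (objective: simpler).

-- ===== PORT A =====
def valleys (data : List Int) : List Int :=
  (PySem.List.enumerate data 0).foldl
    (fun lst p => if p.1 = 9 then lst ++ [p.2] else if p.1 = 17 then lst ++ [p.2] else lst) []

-- ===== PORT B =====
def valleys_alt (data : List Int) : List Int :=
  (if 9 < data.length then [data.getD 9 0] else []) ++
  (if 17 < data.length then [data.getD 17 0] else [])

-- ===== PRECONDITION & SPEC =====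
def Spec_valleys (data : List Int) (out : List Int) : Prop := out = valleys_alt data
instance (data : List Int) (out : List Int) : Decidable (Spec_valleys data out) := by unfold Spec_valleys; infer_instance

-- ===== CLAIM (what is proved, stated in full; the proofs are below) =====
def Claim_equal_valleys : Prop := ∀ (data : List Int), Dom_valleys data → Spec_valleys data (valleys data)

-- ===== LEMMAS AND PROOFS =====

theorem valleys_loop (l : List Int) (s : Int) (acc : List Int) (hs : 0 ≤ s) :
    (PySem.List.enumerate l s).foldl
      (fun lst p => if p.1 = 9 then lst ++ [p.2] else if p.1 = 17 then lst ++ [p.2] else lst) acc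
    = acc ++ (if s ≤ 9 ∧ 9 < s + l.length then [l.getD (9 - s).toNat 0] else [])
          ++ (if s ≤ 17 ∧ 17 < s + l.length then [l.getD (17 - s).toNat 0] else []) := by
  induction l generalizing s acc with
  | nil =>
      simp [PySem.List.enumerate_nil]
  | cons x xs ih =>
      rw [PySem.List.enumerate_cons, List.foldl_cons]
      rw [ih (s + 1) _ (by omega)]
      by_cases h9 : s = 9
      · subst h9
        have e1 : ¬ ((9:Int) + 1 ≤ 9 ∧ 9 < 9 + 1 + (xs.length : Int)) := by omega
        have e2 : ((9:Int) ≤ 9 ∧ 9 < 9 + ((x :: xs).length : Int)) := by simp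
        have e3 : (((9:Int) + 1 ≤ 17 ∧ 17 < 9 + 1 + (xs.length : Int)) ↔
                   ((9:Int) ≤ 17 ∧ 17 < 9 + ((x :: xs).length : Int))) := by simp; omega
        rw [if_neg e1, if_pos e2]
        have hg : ((9:Int) - 9).toNat = 0 := by decide
        rw [hg]
        by_cases h17 : (9:Int) + 1 ≤ 17 ∧ 17 < 9 + 1 + (xs.length : Int)
        · rw [if_pos h17, if_pos (e3.mp h17)]
          have : ((17:Int) - 9).toNat = ((17:Int) - (9+1)).toNat + 1 := by decide
          simp [List.getD]
        · rw [if_neg h17, if_neg (fun h => h17 (e3.mpr h))]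
          simp
      · by_cases h17 : s = 17
        · subst h17
          simp only [if_neg (by omega : ¬ ((17:Int) = 9))]
          have e1 : ¬ ((17:Int) + 1 ≤ 9 ∧ 9 < 17 + 1 + (xs.length : Int)) := by omega
          have e1' : ¬ ((17:Int) ≤ 9 ∧ 9 < 17 + ((x :: xs).length : Int)) := by omega
          have e2 : ¬ ((17:Int) + 1 ≤ 17 ∧ 17 < 17 + 1 + (xs.length : Int)) := by omega
          have e2' : ((17:Int) ≤ 17 ∧ 17 < 17 + ((x :: xs).length : Int)) := by simp
          rw [if_neg e1, if_neg e1', if_neg e2, if_pos e2']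
          have hg : ((17:Int) - 17).toNat = 0 := by decide
          simp [List.getD]
        · simp only [if_neg h9, if_neg h17]
          congr 1
          · by_cases hc : s + 1 ≤ 9 ∧ 9 < s + 1 + (xs.length : Int)
            · have hc' : s ≤ 9 ∧ 9 < s + ((x :: xs).length : Int) := by simp; omega
              rw [if_pos hc, if_pos hc']
              have : ((9:Int) - s).toNat = ((9:Int) - (s+1)).toNat + 1 := by omega
              simp [this, List.getD]
            · have hc' : ¬ (s ≤ 9 ∧ 9 < s + ((x :: xs).length : Int)) := by
                simp only [List.length_cons]; push_cast; omega
              rw [if_neg hc, if_neg hc']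
          · by_cases hc : s + 1 ≤ 17 ∧ 17 < s + 1 + (xs.length : Int)
            · have hc' : s ≤ 17 ∧ 17 < s + ((x :: xs).length : Int) := by simp; omega
              rw [if_pos hc, if_pos hc']
              have : ((17:Int) - s).toNat = ((17:Int) - (s+1)).toNat + 1 := by omega
              simp [this, List.getD]
            · have hc' : ¬ (s ≤ 17 ∧ 17 < s + ((x :: xs).length : Int)) := by
                simp only [List.length_cons]; push_cast; omega
              rw [if_neg hc, if_neg hc']

-- ===== VERDICT (by name: the statement is the Claim_ definition above) =====
theorem valleys_spec : Claim_equal_valleys := by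
  intro data _
  unfold Spec_valleys valleys valleys_alt
  rw [valleys_loop data 0 [] (by omega)]
  have h9 : ((0:Int) ≤ 9 ∧ 9 < 0 + (data.length : Int)) ↔ 9 < data.length := by omega
  have h17 : ((0:Int) ≤ 17 ∧ 17 < 0 + (data.length : Int)) ↔ 17 < data.length := by omega
  simp only [List.nil_append]
  congr 1
  · by_cases h : 9 < data.length
    · rw [if_pos (h9.mpr h), if_pos h]; simp
    · rw [if_neg (fun hh => h (h9.mp hh)), if_neg h]
  · by_cases h : 17 < data.length
    · rw [if_pos (h17.mpr h), if_pos h]; simp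
    · rw [if_neg (fun hh => h (h17.mp hh)), if_neg h]
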